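-- pv_equiv track=rewrite | github.com/ydb-platform/ydb | contrib/python/ezdxf/ezdxf/addons/menger_sponge.py | manifold_faces
-- ===== SOURCE A (Python) =====
-- from typing import TYPE_CHECKING, Iterator, Sequence, Optional
--
-- def manifold_faces(faces: list[Sequence[int]]) -> Iterator[Sequence[int]]:
--     ledger: dict[tuple[int, ...], list[Sequence[int]]] = {}
--     for face in faces:
--         key = tuple(sorted(face))
--         try:
--             ledger[key].append(face)
--         except KeyError:
--             ledger[key] = [face]
--     for faces in ledger.values():
--         if len(faces) == 1:
--             yield faces[0]
-- ===== SOURCE B (Python) =====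
-- def manifold_faces(faces):
--     # No grouping structure at all: for each face, count directly how many
--     # faces in the list share its sorted-vertex key; yield it if unique.
--     for face in faces:
--         key = sorted(face)
--         if sum(1 for other in faces if sorted(other) == key) == 1:
--             yield face
-- ===== Notes on version B (the rewrite author's own statement) =====
-- stated objective: simpler
-- what changed: Drops A's ledger dict of per-key face buckets entirely: B is a dictionary-free nested scan that, for each face, directly counts how many faces in the list share its sorted-vertex key and yields it when the count is 1; output order is input order, which equals A's insertion-order dict iteration because a unique key's bucket holds exactly its one face.
import Mathlib
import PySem

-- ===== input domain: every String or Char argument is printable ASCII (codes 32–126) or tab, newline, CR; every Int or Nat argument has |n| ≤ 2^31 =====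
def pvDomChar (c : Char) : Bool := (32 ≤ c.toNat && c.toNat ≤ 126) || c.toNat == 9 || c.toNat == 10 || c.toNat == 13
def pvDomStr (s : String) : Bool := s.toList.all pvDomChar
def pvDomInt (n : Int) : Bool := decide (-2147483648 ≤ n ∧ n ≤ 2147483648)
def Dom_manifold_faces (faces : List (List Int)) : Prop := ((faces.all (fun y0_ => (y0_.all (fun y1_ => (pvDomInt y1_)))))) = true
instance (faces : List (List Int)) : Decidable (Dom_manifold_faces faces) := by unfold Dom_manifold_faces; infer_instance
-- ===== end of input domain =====

-- B drops A's ledger dict of per-key buckets entirely: a dictionary-free nested scan counting, for each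
-- face, how many faces share its sorted-vertex key (simpler; quadratic, not faster). A and B are Python
-- generators; the equivalence is about the yielded sequence as a list.

-- ===== PORT A =====
-- ledger[key].append(face) / except KeyError: ledger[key] = [face]  ==  d.modify key [] (fun l => l ++ [face])
def manifold_faces (faces : List (List Int)) : List (List Int) :=
  let ledger : PySem.Dict (List Int) (List (List Int)) :=
    faces.foldl (fun d face =>
      d.modify (PySem.List.sorted face (fun x => x) false) [] (fun l => l ++ [face])) PySem.Dict.empty
  ledger.values.foldl (fun acc g => if g.length = 1 then acc ++ g else acc) []

-- ===== PORT B =====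
-- sum(1 for other in faces if sorted(other) == key)  ==  foldl adding 1 on each match
def manifold_faces_alt (faces : List (List Int)) : List (List Int) :=
  faces.filter (fun face =>
    let key := PySem.List.sorted face (fun x => x) false
    (faces.foldl (fun acc other =>
      if PySem.List.sorted other (fun x => x) false == key then acc + 1 else acc) (0 : Int)) == 1)

-- ===== PRECONDITION & SPEC =====
def Spec_manifold_faces (faces : List (List Int)) (out : List (List Int)) : Prop := out = manifold_faces_alt faces
instance (faces : List (List Int)) (out : List (List Int)) : Decidable (Spec_manifold_faces faces out) := by unfold Spec_manifold_faces; infer_instance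

-- ===== CLAIM (what is proved, stated in full; the proofs are below) =====
def Claim_equal_manifold_faces : Prop := ∀ (faces : List (List Int)), Dom_manifold_faces faces → Spec_manifold_faces faces (manifold_faces faces)

-- ===== LEMMAS AND PROOFS =====

lemma count_key {α κ : Type} [BEq κ] [LawfulBEq κ] (k : α → κ) (rest : List α) (c : κ) :
    (rest.map k).count c = (rest.filter (fun g => k g == c)).length := by
  rw [List.count_eq_countP, List.countP_map, List.countP_eq_length_filter]
  rfl

lemma flatMap_congr_mem {α β : Type} {l : List α} {f g : α → List β} (h : ∀ x ∈ l, f x = g x) :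
    l.flatMap f = l.flatMap g := by
  induction l with
  | nil => rfl
  | cons a t ih => simp [List.flatMap_cons, h a (by simp), ih (fun x hx => h x (by simp [hx]))]

lemma add_cons {κ : Type} [BEq κ] (x y : κ) (s : PySem.Set κ) (h : (y == x) = false) :
    PySem.Set.add (x :: s) y = x :: PySem.Set.add s y := by
  simp only [PySem.Set.add, PySem.Set.contains, List.contains_cons, h, Bool.false_or]
  split <;> simp_all

lemma foldl_add_cons {κ : Type} [BEq κ] : ∀ (xs : List κ) (x : κ) (s : PySem.Set κ),
    (∀ y ∈ xs, (y == x) = false) →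
    List.foldl PySem.Set.add (x :: s) xs = x :: List.foldl PySem.Set.add s xs := by
  intro xs
  induction xs with
  | nil => intro x s _; rfl
  | cons y ys ih =>
    intro x s h
    simp only [List.foldl_cons]
    rw [add_cons x y s (h y (by simp)), ih x _ (fun z hz => h z (by simp [hz]))]

lemma add_of_mem {κ : Type} [BEq κ] [LawfulBEq κ] (s : PySem.Set κ) (x : κ) (h : x ∈ s) :
    PySem.Set.add s x = s := by
  simp only [PySem.Set.add, PySem.Set.contains]
  rw [if_pos (by simpa using h)]

lemma foldl_add_filter {κ : Type} [BEq κ] [LawfulBEq κ] : ∀ (xs : List κ) (x : κ) (s : PySem.Set κ),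
    x ∈ s →
    List.foldl PySem.Set.add s xs = List.foldl PySem.Set.add s (xs.filter (fun y => !(y == x))) := by
  intro xs
  induction xs with
  | nil => intro x s _; rfl
  | cons y ys ih =>
    intro x s h
    by_cases hy : (y == x) = true
    · have hyx : y = x := by simpa using hy
      subst hyx
      simp only [List.filter_cons, hy, Bool.not_true, List.foldl_cons, add_of_mem s y h]
      exact ih y s h
    · have hy' : (y == x) = false := by simpa using hy
      simp only [List.filter_cons, hy', Bool.not_false, List.foldl_cons]
      exact ih x (PySem.Set.add s y) (by simp [PySem.Set.mem_add, h])

lemma ofList_cons {κ : Type} [BEq κ] [LawfulBEq κ] (x : κ) (xs : List κ) :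
    PySem.Set.ofList (x :: xs) = x :: PySem.Set.ofList (xs.filter (fun y => !(y == x))) := by
  have h1 : PySem.Set.ofList (x :: xs) = List.foldl PySem.Set.add [x] xs := by
    rw [PySem.Set.ofList_eq_foldl]
    rfl
  rw [h1, foldl_add_filter xs x [x] (by simp),
      foldl_add_cons _ x [] (by intro y hy; simp at hy; simpa using hy.2)]
  rw [PySem.Set.ofList_eq_foldl]

lemma main_flatMap {α κ : Type} [BEq κ] [LawfulBEq κ] (k : α → κ) :
    ∀ (faces : List α) (q : κ → Bool),
    (PySem.Set.ofList ((faces.map k).filter q)).flatMap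
        (fun c => if (faces.filter (fun f => k f == c)).length = 1
                  then faces.filter (fun f => k f == c) else [])
      = faces.filter (fun f => q (k f) && ((faces.map k).count (k f) == 1)) := by
  intro faces
  induction faces with
  | nil => intro q; rfl
  | cons f rest ih =>
    intro q
    have tail_eq : ∀ (p : κ → Bool), (∀ c, p c = true → (k f == c) = false) →
        (PySem.Set.ofList ((rest.map k).filter p)).flatMap
          (fun c => if ((f :: rest).filter (fun g => k g == c)).length = 1
                    then (f :: rest).filter (fun g => k g == c) else [])
        = rest.filter (fun g => p (k g) && ((rest.map k).count (k g) == 1)) := by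
      intro p hp
      rw [← ih p]
      apply flatMap_congr_mem
      intro c hc
      have hcp : p c = true := by
        have : c ∈ ((rest.map k).filter p) := by simpa [PySem.Set.mem_ofList] using hc
        exact (List.mem_filter.mp this).2
      have hne := hp c hcp
      simp [List.filter_cons, hne]
    by_cases hq : q (k f) = true
    · have hfil : ((f :: rest).map k).filter q = k f :: (rest.map k).filter q := by
        simp [List.filter_cons, hq]
      rw [hfil, ofList_cons, List.filter_filter, List.flatMap_cons]
      set q' : κ → Bool := fun y => !(y == k f) && q y with hq'
      have hq'ne : ∀ c, q' c = true → (k f == c) = false := by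
        intro c hc
        rw [hq'] at hc
        have := (Bool.and_elim_left hc)
        simp at this
        simpa [beq_eq_false_iff_ne] using (Ne.symm this)
      rw [tail_eq q' hq'ne]
      have hhead : (f :: rest).filter (fun g => k g == k f) = f :: rest.filter (fun g => k g == k f) := by
        simp [List.filter_cons]
      rw [hhead]
      have hrhs : (f :: rest).filter (fun g => q (k g) && (((f :: rest).map k).count (k g) == 1))
          = (if ((rest.map k).count (k f) == 0) then [f] else [])
            ++ rest.filter (fun g => q' (k g) && ((rest.map k).count (k g) == 1)) := by
        rw [List.filter_cons]
        have hcnt : (((f :: rest).map k).count (k f)) = (rest.map k).count (k f) + 1 := by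
          simp [List.count_cons]
        have htailf : rest.filter (fun g => q (k g) && (((f :: rest).map k).count (k g) == 1))
            = rest.filter (fun g => q' (k g) && ((rest.map k).count (k g) == 1)) := by
          apply List.filter_congr
          intro g hg
          by_cases hgf : (k g == k f) = true
          · have hgf' : k g = k f := by simpa using hgf
            have hpos : 0 < (rest.map k).count (k g) :=
              List.count_pos_iff.mpr (List.mem_map_of_mem hg)
            have hfg : (k f == k g) = true := by simp [hgf']
            have h1 : (((f :: rest).map k).count (k g) == 1) = false := by
              simp only [List.map_cons, List.count_cons, hfg]
              simp
              omega
            have h2 : q' (k g) = false := by simp [hq', hgf]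
            simp [h1, h2]
            intro _
            rw [List.count_cons]
            simp [List.count_cons, hfg]
            omega
          · have hgf' : (k g == k f) = false := by simpa using hgf
            have hfg : (k f == k g) = false := by
              have : ¬ k f = k g := fun h => by simp [← h] at hgf'
              simpa using this
            have h1 : (((f :: rest).map k).count (k g)) = (rest.map k).count (k g) := by
              simp [List.count_cons, hfg]
            rw [h1]
            simp [hq', hgf']
        rw [htailf]
        by_cases hc0 : (rest.map k).count (k f) = 0
        · simp [hq, List.count_cons, hc0]
        · have : (q (k f) && (((f :: rest).map k).count (k f) == 1)) = false := by
            simp [List.count_cons]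
            omega
          simp [this, hc0]
      rw [hrhs]
      congr 1
      rw [count_key k rest (k f)]
      by_cases hb : (rest.filter (fun g => k g == k f)).length = 0
      · have : rest.filter (fun g => k g == k f) = [] := List.length_eq_zero_iff.mp hb
        simp [this]
      · have hne1 : ¬ (f :: rest.filter (fun g => k g == k f)).length = 1 := by
          simp only [List.length_cons]
          omega
        rw [if_neg hne1, if_neg (by simpa using hb)]
    · have hq0 : q (k f) = false := by simpa using hq
      have hfil : ((f :: rest).map k).filter q = (rest.map k).filter q := by
        simp [List.filter_cons, hq0]
      rw [hfil]
      have hqne : ∀ c, q c = true → (k f == c) = false := by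
        intro c hc
        by_cases h : (k f == c) = true
        · have : k f = c := by simpa using h
          rw [← this] at hc
          rw [hc] at hq0
          exact absurd hq0 (by simp)
        · simpa using h
      rw [tail_eq q hqne]
      rw [List.filter_cons]
      simp only [hq0, Bool.false_and, if_neg (by simp : ¬ (false = true))]
      apply List.filter_congr
      intro g hg
      by_cases hgf : (k g == k f) = true
      · simp [show q (k g) = false from by rwa [show k g = k f from by simpa using hgf]]
      · have hgf' : (k g == k f) = false := by simpa using hgf
        have hfg : (k f == k g) = false := by
          have : ¬ k f = k g := fun h => by simp [← h] at hgf'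
          simpa using this
        simp [List.count_cons, hfg]

lemma values_eq_map_getD {κ ν : Type} [BEq κ] [LawfulBEq κ] (d : PySem.Dict κ ν) (d0 : ν)
    (h : d.keys.Nodup) : d.values = d.keys.map (fun c => d.getD c d0) := by
  show d.items.map (fun p => p.2) = (d.items.map (fun p => p.1)).map _
  rw [List.map_map]
  apply List.map_congr_left
  intro p hp
  obtain ⟨a, b⟩ := p
  exact (PySem.Dict.getD_of_mem_items d hp h d0).symm

def pvKey (f : List Int) : List Int := PySem.List.sorted f (fun x => x) false

lemma ledger_eq (faces : List (List Int)) :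
    (faces.foldl (fun d face =>
        d.modify (PySem.List.sorted face (fun x => x) false) [] (fun l => l ++ [face]))
      (PySem.Dict.empty : PySem.Dict (List Int) (List (List Int))))
    = (faces.map (fun f => (pvKey f, f))).foldl
        (fun d p => d.modify p.1 [] (fun l => l ++ [p.2])) PySem.Dict.empty := by
  rw [List.foldl_map]
  rfl

lemma ledger_getD (faces : List (List Int)) (c : List Int) :
    ((faces.map (fun f => (pvKey f, f))).foldl
        (fun d p => d.modify p.1 [] (fun l => l ++ [p.2]))
        (PySem.Dict.empty : PySem.Dict (List Int) (List (List Int)))).getD c []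
    = faces.filter (fun f => pvKey f == c) := by
  rw [PySem.Dict.getD_foldl_modify_append]
  simp [PySem.Dict.getD_empty, List.filter_map, Function.comp_def, List.map_map]

lemma A_char (faces : List (List Int)) :
    manifold_faces faces = faces.filter (fun f => ((faces.map pvKey).count (pvKey f) == 1)) := by
  show ((faces.foldl (fun d face =>
      d.modify (PySem.List.sorted face (fun x => x) false) [] (fun l => l ++ [face]))
      (PySem.Dict.empty : PySem.Dict (List Int) (List (List Int)))).values).foldl
      (fun acc g => if g.length = 1 then acc ++ g else acc) [] = _
  set L := faces.foldl (fun d face =>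
      d.modify (PySem.List.sorted face (fun x => x) false) [] (fun l => l ++ [face]))
      (PySem.Dict.empty : PySem.Dict (List Int) (List (List Int))) with hL
  have hkeys : L.keys = PySem.Set.ofList (faces.map pvKey) := by
    rw [hL]
    simp only [← pvKey.eq_def]
    rw [ PySem.Dict.keys_foldl_modify_key faces pvKey [] (fun _ x => fun l => l ++ [x]) PySem.Dict.empty,
        PySem.Set.ofList_eq_foldl]
    rfl
  have hnodup : L.keys.Nodup := by
    rw [hL]
    simp only [← pvKey.eq_def]
    exact PySem.Dict.nodup_keys_foldl_modify_key faces pvKey [] (fun _ x => fun l => l ++ [x])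
      PySem.Dict.empty (by simp [PySem.Dict.keys_empty])
  have hgetD : ∀ c, L.getD c [] = faces.filter (fun f => pvKey f == c) := by
    intro c
    rw [hL, ledger_eq, ledger_getD]
  rw [values_eq_map_getD L [] hnodup, hkeys]
  have hbody : (fun (acc : List (List Int)) g => if g.length = 1 then acc ++ g else acc)
      = (fun acc g => acc ++ (if g.length = 1 then g else [])) := by
    funext acc g
    split <;> simp
  rw [hbody, PySem.List.foldl_append_eq_flatMap, List.nil_append, List.flatMap_map]
  have hmain := main_flatMap pvKey faces (fun _ => true)
  rw [List.filter_true] at hmain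
  simp only [Bool.true_and] at hmain
  rw [← hmain]
  apply flatMap_congr_mem
  intro c _
  simp [Function.comp_def, hgetD c]

lemma foldl_count {α : Type} (p : α → Bool) : ∀ (l : List α) (c : Int),
    l.foldl (fun acc x => if p x then acc + 1 else acc) c = c + (l.filter p).length := by
  intro l
  induction l with
  | nil => intro c; simp
  | cons a t ih =>
    intro c
    simp only [List.foldl_cons, List.filter_cons]
    by_cases h : p a = true
    · rw [if_pos h, if_pos h, ih]
      simp
      omega
    · rw [if_neg h, if_neg (by simp [h]), ih]

lemma B_char (faces : List (List Int)) :
    manifold_faces_alt faces = faces.filter (fun f => ((faces.map pvKey).count (pvKey f) == 1)) := by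
  show faces.filter _ = _
  apply List.filter_congr
  intro f _
  show ((faces.foldl (fun acc other =>
      if PySem.List.sorted other (fun x => x) false == PySem.List.sorted f (fun x => x) false
      then acc + 1 else acc) (0 : Int)) == 1) = _
  rw [foldl_count, count_key pvKey faces (pvKey f)]
  simp only [← pvKey.eq_def, Int.zero_add]
  by_cases h : (faces.filter (fun g => pvKey g == pvKey f)).length = 1 <;> simp [h]

theorem manifold_faces_equal (faces : List (List Int)) :
    manifold_faces faces = manifold_faces_alt faces := by
  rw [A_char, B_char]

-- ===== VERDICT (by name: the statement is the Claim_ definition above) =====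
theorem manifold_faces_spec : Claim_equal_manifold_faces := by
  intro faces _
  unfold Spec_manifold_faces
  exact manifold_faces_equal faces
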